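-- pv_equiv track=rewrite | github.com/nelsonlai/freelance | leetcode/leetcode_problems/codes/1627_graph-connectivity-with-threshold/python3.py | areConnected
-- ===== SOURCE A (Python) =====
-- from typing import List
--
-- def areConnected(n: int, threshold: int, queries: List[List[int]]) -> List[bool]:
--     parent = list(range(n + 1))
--
--     def find(x):
--         if parent[x] != x:
--             parent[x] = find(parent[x])
--         return parent[x]
--
--     def union(x, y):
--         px, py = find(x), find(y)
--         if px != py:
--             parent[px] = py
--
--     # Connect nodes with GCD > threshold
--     for i in range(threshold + 1, n + 1):
--         for j in range(i * 2, n + 1, i):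
--             union(i, j)
--
--     return [find(u) == find(v) for u, v in queries]
-- ===== SOURCE B (Python) =====
-- from typing import List
--
-- def areConnected(n: int, threshold: int, queries: List[List[int]]) -> List[bool]:
--     # component labels instead of a union-find forest: merge = relabel one class
--     comp = list(range(n + 1))
--     for i in range(threshold + 1, n + 1):
--         for j in range(i * 2, n + 1, i):
--             ci, cj = comp[i], comp[j]
--             if ci != cj:
--                 comp = [cj if c == ci else c for c in comp]
--     return [comp[u] == comp[v] for u, v in queries]
-- ===== Notes on version B (the rewrite author's own statement) =====
-- stated objective: simpler
-- what changed: Replaces the union-find forest (recursive find with path compression, union by root re-linking) with a flat component-label array: a merge rewrites every label of one class to the other class's label, and each query just compares the two labels.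
import Mathlib
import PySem

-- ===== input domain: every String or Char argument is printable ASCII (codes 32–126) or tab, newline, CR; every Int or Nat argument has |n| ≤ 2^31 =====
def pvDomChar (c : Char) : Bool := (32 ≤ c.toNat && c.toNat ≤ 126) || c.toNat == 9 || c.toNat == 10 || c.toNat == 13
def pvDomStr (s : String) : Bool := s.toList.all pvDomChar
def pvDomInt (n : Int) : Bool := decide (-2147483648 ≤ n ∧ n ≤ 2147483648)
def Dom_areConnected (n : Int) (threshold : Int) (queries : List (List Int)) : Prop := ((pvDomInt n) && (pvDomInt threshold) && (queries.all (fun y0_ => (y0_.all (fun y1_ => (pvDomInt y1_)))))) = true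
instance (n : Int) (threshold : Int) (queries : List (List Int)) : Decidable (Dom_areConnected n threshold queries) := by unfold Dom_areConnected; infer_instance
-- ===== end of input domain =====

-- B replaces A's union-find forest by a flat component-label array (merge = relabel one
-- class, query = compare labels); objective: simpler, not faster.

-- ===== PORT A =====
-- Python's recursive `find` with path compression; `fuel` is only a totality guard
-- (the proofs show fuel = parent.length + 1 is never exhausted on admitted inputs).
def findA (fuel : Nat) (p : List Int) (x : Int) : List Int × Int :=
  match fuel with
  | 0 => (p, x)
  | Nat.succ f =>
    let px := PySem.List.pyGetD p x 0
    if px ≠ x then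
      let res := findA f p px
      (PySem.List.pySetD res.1 x res.2, res.2)
    else (p, x)

def unionA (p : List Int) (x y : Int) : List Int :=
  let r1 := findA (p.length + 1) p x
  let r2 := findA (r1.1.length + 1) r1.1 y
  if r1.2 ≠ r2.2 then PySem.List.pySetD r2.1 r1.2 r2.2 else r2.1

-- one query `find(u) == find(v)` (threads the mutated parent list)
def queryStepA (st : List Int × List Bool) (q : List Int) : List Int × List Bool :=
  match q with
  | [u, v] =>
    let r1 := findA (st.1.length + 1) st.1 u
    let r2 := findA (r1.1.length + 1) r1.1 v
    (r2.1, st.2 ++ [decide (r1.2 = r2.2)])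
  | _ => st

def areConnected (n : Int) (threshold : Int) (queries : List (List Int)) : List Bool :=
  let parent0 : List Int := PySem.List.pyRange 0 (n + 1) 1
  let parent1 := (PySem.List.pyRange (threshold + 1) (n + 1) 1).foldl
      (fun p i => (PySem.List.pyRange (i * 2) (n + 1) i).foldl (fun p j => unionA p i j) p)
      parent0
  (queries.foldl queryStepA (parent1, [])).2

-- ===== PORT B =====
-- one query `comp[u] == comp[v]`
def queryB (comp : List Int) (q : List Int) : Bool :=
  match q with
  | [u, v] => decide (PySem.List.pyGetD comp u 0 = PySem.List.pyGetD comp v 0)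
  | _ => false

def areConnected_alt (n : Int) (threshold : Int) (queries : List (List Int)) : List Bool :=
  let comp0 : List Int := PySem.List.pyRange 0 (n + 1) 1
  let comp := (PySem.List.pyRange (threshold + 1) (n + 1) 1).foldl
      (fun c i => (PySem.List.pyRange (i * 2) (n + 1) i).foldl
        (fun c j =>
          let ci := PySem.List.pyGetD c i 0
          let cj := PySem.List.pyGetD c j 0
          if ci ≠ cj then c.map (fun x => if x = ci then cj else x) else c)
        c)
      comp0
  queries.map (queryB comp)

-- ===== PRECONDITION & SPEC =====
-- Pre_ = exactly the inputs where Python A returns: threshold < 0 with n ≥ 0 reaches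
-- range(0, n+1, 0) (ValueError); a query must have exactly 2 elements (unpacking), each a
-- valid (possibly negative, Python-wrapped) index into the length-(n+1) parent list.
def Pre_areConnected (n : Int) (threshold : Int) (queries : List (List Int)) : Prop :=
  (0 ≤ n → 0 ≤ threshold) ∧ ∀ q ∈ queries, q.length = 2 ∧ ∀ e ∈ q, -(n + 1) ≤ e ∧ e ≤ n
instance (n : Int) (threshold : Int) (queries : List (List Int)) : Decidable (Pre_areConnected n threshold queries) := by unfold Pre_areConnected; infer_instance

def pvWitness_areConnected : Int × Int × List (List Int) := (10, 1, [[4, 8], [3, 9], [1, 2], [-1, 10]])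

def Spec_areConnected (n : Int) (threshold : Int) (queries : List (List Int)) (out : List Bool) : Prop := out = areConnected_alt n threshold queries
instance (n : Int) (threshold : Int) (queries : List (List Int)) (out : List Bool) : Decidable (Spec_areConnected n threshold queries out) := by unfold Spec_areConnected; infer_instance

-- ===== CLAIM (what is proved, stated in full; the proofs are below) =====
def Claim_equal_areConnected : Prop := ∀ (n : Int) (threshold : Int) (queries : List (List Int)), Dom_areConnected n threshold queries → Pre_areConnected n threshold queries → Spec_areConnected n threshold queries (areConnected n threshold queries)

-- ===== LEMMAS AND PROOFS =====

-- ---- model: parent-pointer chains ----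
def pstep (p : List Int) (k : Nat) : Nat := (p.getD k 0).toNat
def pfix (p : List Int) (k : Nat) : Prop := p.getD k 0 = (k : Int)
def iterF (p : List Int) : Nat → Nat → Nat
  | 0, k => k
  | s + 1, k => iterF p s (pstep p k)
/-- r is the root of k's chain. -/
def Rt (p : List Int) (k r : Nat) : Prop := (∃ s, iterF p s k = r) ∧ pfix p r
/-- all entries are indices into p. -/
def InR (p : List Int) : Prop := ∀ k, k < p.length → 0 ≤ p.getD k 0 ∧ p.getD k 0 < (p.length : Int)
/-- d certifies acyclicity: every non-root edge strictly decreases d. -/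
def Cert (p : List Int) (d : Nat → Nat) : Prop := ∀ k, k < p.length → ¬ pfix p k → d (pstep p k) < d k
/-- comp agrees with the root function of p. -/
def CInv (p comp : List Int) : Prop := ∀ k, k < p.length → ∃ r, Rt p k r ∧ comp.getD k 0 = (r : Int)

theorem iterF_add (p : List Int) (a b k : Nat) : iterF p (a + b) k = iterF p b (iterF p a k) := by
  induction a generalizing k with
  | zero => simp [iterF]
  | succ a ih => rw [Nat.succ_add]; simp only [iterF]; exact ih _
theorem iterF_succ_right (p : List Int) (s k : Nat) : iterF p (s + 1) k = pstep p (iterF p s k) := by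
  rw [iterF_add p s 1 k]; rfl

theorem pstep_fix {p : List Int} {r : Nat} (h : pfix p r) : pstep p r = r := by
  simp [pstep, pfix] at *; rw [h]; simp
theorem iterF_fix {p : List Int} {r : Nat} (h : pfix p r) (s : Nat) : iterF p s r = r := by
  induction s with
  | zero => rfl
  | succ s ih => simp only [iterF, pstep_fix h]; exact ih
theorem Rt_unique {p : List Int} {k r1 r2 : Nat} (h1 : Rt p k r1) (h2 : Rt p k r2) : r1 = r2 := by
  obtain ⟨⟨s1, hs1⟩, hf1⟩ := h1
  obtain ⟨⟨s2, hs2⟩, hf2⟩ := h2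
  rcases Nat.le_total s1 s2 with h | h
  · obtain ⟨t, rfl⟩ := Nat.le.dest h
    rw [iterF_add, hs1, iterF_fix hf1] at hs2; omega
  · obtain ⟨t, rfl⟩ := Nat.le.dest h
    rw [iterF_add, hs2, iterF_fix hf2] at hs1; omega
theorem Rt_self {p : List Int} {r : Nat} (h : pfix p r) : Rt p r r := ⟨⟨0, rfl⟩, h⟩
theorem Rt_of_step {p : List Int} {k r : Nat} (h : Rt p (pstep p k) r) : Rt p k r := by
  obtain ⟨⟨s, hs⟩, hf⟩ := h
  exact ⟨⟨s + 1, by rw [Nat.add_comm, iterF_add]; simpa [iterF] using hs⟩, hf⟩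
theorem Rt_step {p : List Int} {k r : Nat} (hk : ¬ pfix p k) (h : Rt p k r) : Rt p (pstep p k) r := by
  obtain ⟨⟨s, hs⟩, hf⟩ := h
  cases s with
  | zero => exact absurd (by rw [show k = r from hs]; exact hf) hk
  | succ s => exact ⟨⟨s, hs⟩, hf⟩
theorem iterF_lt {p : List Int} (hR : InR p) {k : Nat} (hk : k < p.length) (s : Nat) :
    iterF p s k < p.length := by
  induction s generalizing k with
  | zero => exact hk
  | succ s ih =>
    simp only [iterF]
    apply ih
    have := hR k hk
    simp only [pstep]
    omega
theorem d_iterF_le {p : List Int} {d : Nat → Nat} (hC : Cert p d) (hR : InR p) {k : Nat}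
    (hk : k < p.length) (s : Nat) : d (iterF p s k) ≤ d k := by
  induction s generalizing k with
  | zero => exact le_refl _
  | succ s ih =>
    simp only [iterF]
    refine le_trans (ih ?_) ?_
    · have := hR k hk; simp only [pstep]; omega
    · by_cases hfk : pfix p k
      · rw [pstep_fix hfk]
      · exact le_of_lt (hC k hk hfk)
theorem d_chain_lt {p : List Int} {d : Nat → Nat} (hC : Cert p d) (hR : InR p) {k : Nat}
    (hk : k < p.length) : ∀ i t, 0 < t → (∀ s, s < i + t → ¬ pfix p (iterF p s k)) →
    d (iterF p (i + t) k) < d (iterF p i k) := by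
  intro i t
  induction t with
  | zero => omega
  | succ t iht =>
    intro _ hnf
    have h1 : d (iterF p (i + t + 1) k) < d (iterF p (i + t) k) := by
      rw [iterF_succ_right]
      exact hC _ (iterF_lt hR hk _) (hnf (i + t) (by omega))
    rcases Nat.eq_zero_or_pos t with h0 | h0
    · subst h0; simpa using h1
    · have h2 := iht h0 (fun s hs => hnf s (by omega))
      calc d (iterF p (i + (t + 1)) k) < d (iterF p (i + t) k) := by
             simpa [← Nat.add_assoc] using h1
           _ < d (iterF p i k) := h2

theorem root_exists {p : List Int} {d : Nat → Nat} (hR : InR p) (hC : Cert p d) {k : Nat}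
    (hk : k < p.length) : ∃ s, s < p.length ∧ pfix p (iterF p s k) := by
  by_contra hcon
  push Not at hcon
  have hmaps : ∀ s ∈ Finset.range (p.length + 1), iterF p s k ∈ Finset.range p.length := by
    intro s _
    exact Finset.mem_range.mpr (iterF_lt hR hk s)
  have hcard : (Finset.range p.length).card < (Finset.range (p.length + 1)).card := by simp
  obtain ⟨i, hi, j, hj, hij, heq⟩ := Finset.exists_ne_map_eq_of_card_lt_of_maps_to hcard hmaps
  simp only [Finset.mem_range] at hi hj
  have main : ∀ a b : Nat, a < b → b ≤ p.length → iterF p a k = iterF p b k → False := by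
    intro a b hab hble heqab
    have hnf : ∀ s, s < a + (b - a) → ¬ pfix p (iterF p s k) := by
      intro s hs
      exact hcon s (by omega)
    have := d_chain_lt hC hR hk a (b - a) (by omega) hnf
    rw [show a + (b - a) = b by omega, ← heqab] at this
    omega
  rcases Nat.lt_or_ge i j with hlt | hge
  · exact main i j hlt (by omega) heq
  · exact main j i (by omega) (by omega) heq.symm


-- getD/set helpers
theorem getD_set_self {xs : List Int} {i : Nat} (h : i < xs.length) (v : Int) :
    (xs.set i v).getD i 0 = v := by
  rw [List.getD_eq_getElem?_getD, List.getElem?_set_self h]; rfl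
theorem getD_set_ne {xs : List Int} {i j : Nat} (h : j ≠ i) (v : Int) :
    (xs.set i v).getD j 0 = xs.getD j 0 := by
  rw [List.getD_eq_getElem?_getD, List.getElem?_set_ne (Ne.symm h), ← List.getD_eq_getElem?_getD]
theorem set_eq_self {xs : List Int} {i : Nat} {v : Int} (h : xs.getD i 0 = v) (hi : i < xs.length) :
    xs.set i v = xs := by
  apply List.ext_getElem?
  intro j
  by_cases hj : j = i
  · subst hj
    rw [List.getElem?_set_self hi, List.getElem?_eq_getElem hi]
    rw [List.getD_eq_getElem?_getD, List.getElem?_eq_getElem hi] at h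
    simp at h
    rw [h]
  · exact List.getElem?_set_ne (fun hh => hj hh.symm)


-- re-pointing a non-root a at its own root r preserves every root
theorem set_root_equiv {p : List Int} {a r0 : Nat} (ha : a < p.length) (hnf : ¬ pfix p a)
    (hRt : Rt p a r0) : ∀ j r', Rt p j r' ↔ Rt (p.set a (r0 : Int)) j r' := by
  have hr0a : r0 ≠ a := by
    rintro rfl; exact hnf hRt.2
  have hfix' : ∀ t, t ≠ a → (pfix (p.set a (r0 : Int)) t ↔ pfix p t) := by
    intro t ht; unfold pfix; rw [getD_set_ne ht]
  have hfixa : ¬ pfix (p.set a (r0 : Int)) a := by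
    unfold pfix; rw [getD_set_self ha]
    intro h; exact hr0a (by exact_mod_cast h)
  have hstep' : ∀ t, t ≠ a → pstep (p.set a (r0 : Int)) t = pstep p t := by
    intro t ht; unfold pstep; rw [getD_set_ne ht]
  have hstepa : pstep (p.set a (r0 : Int)) a = r0 := by
    unfold pstep; rw [getD_set_self ha]; simp
  intro j r'
  constructor
  · rintro ⟨⟨s, hs⟩, hf⟩
    induction s generalizing j with
    | zero =>
      have hjr : j = r' := hs
      subst hjr
      have hja : j ≠ a := fun h => hnf (h ▸ hf)
      exact ⟨⟨0, rfl⟩, (hfix' j hja).mpr hf⟩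
    | succ s ih =>
      by_cases hj : pfix p j
      · exact ih j (by rw [← pstep_fix hj]; exact hs)
      · by_cases hja : j = a
        · subst hja
          have : r' = r0 := Rt_unique ⟨⟨s + 1, hs⟩, hf⟩ hRt
          rw [this]
          exact ⟨⟨1, hstepa⟩, (hfix' r0 hr0a).mpr hRt.2⟩
        · have := ih (pstep p j) hs
          rw [← hstep' j hja] at this
          exact Rt_of_step this
  · rintro ⟨⟨s, hs⟩, hf⟩
    induction s generalizing j with
    | zero =>
      have hjr : j = r' := hs
      subst hjr
      have hja : j ≠ a := fun h => hfixa (h ▸ hf)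
      exact ⟨⟨0, rfl⟩, (hfix' j hja).mp hf⟩
    | succ s ih =>
      by_cases hj : pfix (p.set a (r0 : Int)) j
      · exact ih j (by rw [← pstep_fix hj]; exact hs)
      · by_cases hja : j = a
        · have hs' : iterF (p.set a (r0 : Int)) s r0 = r' := by
            have hs1 : iterF (p.set a (r0 : Int)) s (pstep (p.set a (r0 : Int)) j) = r' := hs
            rwa [hja, hstepa] at hs1
          have h1 : Rt p r0 r' := ih r0 hs'
          have h2 : r' = r0 := Rt_unique h1 (Rt_self hRt.2)
          rw [hja, h2]; exact hRt
        · have := ih (pstep p j) (by rw [← hstep' j hja]; exact hs)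
          exact Rt_of_step this

-- linking root a under root b: new root of k is b wherever it was a
theorem set_link_root {p : List Int} {a b : Nat} (ha : a < p.length) (hfa : pfix p a)
    (hfb : pfix p b) (hab : a ≠ b) :
    ∀ k r, Rt p k r → Rt (p.set a (b : Int)) k (if r = a then b else r) := by
  have hfix' : ∀ t, t ≠ a → (pfix (p.set a (b : Int)) t ↔ pfix p t) := by
    intro t ht; unfold pfix; rw [getD_set_ne ht]
  have hstep' : ∀ t, t ≠ a → pstep (p.set a (b : Int)) t = pstep p t := by
    intro t ht; unfold pstep; rw [getD_set_ne ht]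
  have hstepa : pstep (p.set a (b : Int)) a = b := by
    unfold pstep; rw [getD_set_self ha]; simp
  rintro k r ⟨⟨s, hs⟩, hf⟩
  induction s generalizing k with
  | zero =>
    have hkr : k = r := hs
    subst hkr
    by_cases hka : k = a
    · subst hka
      rw [if_pos rfl]
      exact ⟨⟨1, hstepa⟩, (hfix' b (Ne.symm hab)).mpr hfb⟩
    · rw [if_neg hka]
      exact ⟨⟨0, rfl⟩, (hfix' k hka).mpr hf⟩
  | succ s ih =>
    by_cases hk : pfix p k
    · exact ih k (by rw [← pstep_fix hk]; exact hs)
    · have hka : k ≠ a := fun h => hk (h ▸ hfa)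
      have := ih (pstep p k) hs
      rw [← hstep' k hka] at this
      exact Rt_of_step this

-- the big find lemma, natural-index version
theorem find_spec {d : Nat → Nat} :
    ∀ (s : Nat) (p : List Int) (k fuel : Nat), InR p → Cert p d → k < p.length →
    pfix p (iterF p s k) → s < fuel →
    ∃ p', findA fuel p (k : Int) = (p', ((iterF p s k : Nat) : Int)) ∧
      p'.length = p.length ∧ InR p' ∧ Cert p' d ∧ (∀ j r, Rt p j r ↔ Rt p' j r) := by
  intro s
  induction s with
  | zero =>
    intro p k fuel hR hC hk hfix hfuel
    obtain ⟨f, rfl⟩ : ∃ f, fuel = f + 1 := ⟨fuel - 1, by omega⟩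
    refine ⟨p, ?_, rfl, hR, hC, fun _ _ => Iff.rfl⟩
    have hpx : PySem.List.pyGetD p (k : Int) 0 = (k : Int) := by
      rw [PySem.List.pyGetD_natCast]; exact hfix
    simp [findA, hpx, iterF]
  | succ s ih =>
    intro p k fuel hR hC hk hfix hfuel
    obtain ⟨f, rfl⟩ : ∃ f, fuel = f + 1 := ⟨fuel - 1, by omega⟩
    by_cases hfk : pfix p k
    · -- already a root: the guard fails
      have hpx : PySem.List.pyGetD p (k : Int) 0 = (k : Int) := by
        rw [PySem.List.pyGetD_natCast]; exact hfk
      refine ⟨p, ?_, rfl, hR, hC, fun _ _ => Iff.rfl⟩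
      rw [iterF_fix hfk]
      simp [findA, hpx]
    · have hks : 0 ≤ p.getD k 0 ∧ p.getD k 0 < (p.length : Int) := hR k hk
      have hpxcast : p.getD k 0 = ((pstep p k : Nat) : Int) := by
        unfold pstep; rw [Int.toNat_of_nonneg hks.1]
      have hsk : pstep p k < p.length := by
        unfold pstep; omega
      have hfix' : pfix p (iterF p s (pstep p k)) := hfix
      obtain ⟨p1, heq1, hlen1, hR1, hC1, hrt1⟩ :=
        ih p (pstep p k) f hR hC hsk hfix' (by omega)
      set r0 : Nat := iterF p s (pstep p k) with hr0def
      have hr0lt : r0 < p.length := iterF_lt hR hsk s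
      have hRtk : Rt p k r0 := ⟨⟨s + 1, rfl⟩, hfix⟩
      have hRtk1 : Rt p1 k r0 := (hrt1 k r0).mp hRtk
      have hnf1 : ¬ pfix p1 k := by
        intro hfx
        have h1 : Rt p k k := (hrt1 k k).mpr (Rt_self hfx)
        have h2 : k = r0 := Rt_unique h1 hRtk
        exact hfk (h2 ▸ hfix)
      have hr0k : r0 ≠ k := by
        intro h
        exact hfk (h ▸ hfix)
      have hklen1 : k < p1.length := by omega
      refine ⟨p1.set k (r0 : Int), ?_, ?_, ?_, ?_, ?_⟩
      · have hpx : PySem.List.pyGetD p (k : Int) 0 = p.getD k 0 := PySem.List.pyGetD_natCast ..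
        have hguard : p.getD k 0 ≠ (k : Int) := hfk
        have : iterF p (s + 1) k = r0 := rfl
        rw [this]
        simp only [findA, hpx]
        rw [if_pos (by simpa using hguard), hpxcast, heq1]
        simp [PySem.List.pySetD_natCast]
      · simp [hlen1]
      · intro t ht
        simp only [List.length_set] at ht
        by_cases htk : t = k
        · rw [htk]
          rw [getD_set_self hklen1]
          constructor
          · exact_mod_cast Nat.zero_le r0
          · simp only [List.length_set]
            rw [hlen1]; exact_mod_cast hr0lt
        · rw [getD_set_ne htk]
          have := hR1 t (by omega)
          simpa using this
      · intro t ht htnf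
        simp only [List.length_set] at ht
        by_cases htk : t = k
        · rw [htk]
          have hstept : pstep (p1.set k (r0 : Int)) k = r0 := by
            unfold pstep; rw [getD_set_self hklen1]; simp
          rw [hstept]
          have hd1 : d r0 ≤ d (pstep p k) := by
            rw [hr0def]; exact d_iterF_le hC hR hsk s
          have hd2 : d (pstep p k) < d k := hC k hk hfk
          omega
        · have hfixt : ¬ pfix p1 t := by
            unfold pfix at htnf ⊢
            rwa [getD_set_ne htk] at htnf
          have hstept : pstep (p1.set k (r0 : Int)) t = pstep p1 t := by
            unfold pstep; rw [getD_set_ne htk]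
          rw [hstept]
          exact hC1 t (by omega) hfixt
      · intro j r
        rw [hrt1 j r]
        exact set_root_equiv hklen1 hnf1 hRtk1 j r

-- Python wrap of a negative index, for get and set
theorem pyGetD_wrap (p : List Int) (x : Int) (h0 : -(p.length : Int) ≤ x) (h1 : x < 0) :
    PySem.List.pyGetD p x 0 = p.getD (x + p.length).toNat 0 := by
  have hidx : p.length - (-x).toNat = (x + p.length).toNat := by omega
  have hlt : (x + p.length).toNat < p.length := by omega
  simp [PySem.List.pyGetD, PySem.List.pyGet?, PySem.List.pyIdx?, not_le.mpr h1, h0, hidx,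
    List.getD_eq_getElem?_getD, List.getElem?_eq_getElem hlt]

theorem pySetD_wrap (p : List Int) (x v : Int) (h0 : -(p.length : Int) ≤ x) (h1 : x < 0) :
    PySem.List.pySetD p x v = p.set (x + p.length).toNat v := by
  have hidx : p.length - (-x).toNat = (x + p.length).toNat := by omega
  simp [PySem.List.pySetD, PySem.List.pySet?, PySem.List.pyIdx?, not_le.mpr h1, h0, hidx]

-- Int-index version (Python wraps a negative index)
theorem find_spec_int {d : Nat → Nat} (p : List Int) (x : Int) (s fuel : Nat)
    (hR : InR p) (hC : Cert p d) (hx0 : -(p.length : Int) ≤ x) (hx1 : x < (p.length : Int))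
    (hfix : pfix p (iterF p s (if x < 0 then x + p.length else x).toNat)) (hfuel : s + 1 < fuel) :
    ∃ p', findA fuel p x = (p', ((iterF p s (if x < 0 then x + p.length else x).toNat : Nat) : Int)) ∧
      p'.length = p.length ∧ InR p' ∧ Cert p' d ∧ (∀ j r, Rt p j r ↔ Rt p' j r) := by
  by_cases hneg : x < 0
  · rw [if_pos hneg] at hfix ⊢
    set nu : Nat := (x + p.length).toNat with hnudef
    have hnu : nu < p.length := by omega
    obtain ⟨f, rfl⟩ : ∃ f, fuel = f + 1 := ⟨fuel - 1, by omega⟩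
    have hpx : PySem.List.pyGetD p x 0 = p.getD nu 0 := pyGetD_wrap p x hx0 hneg
    have hnn : 0 ≤ p.getD nu 0 ∧ p.getD nu 0 < (p.length : Int) := hR nu hnu
    have hguard : PySem.List.pyGetD p x 0 ≠ x := by rw [hpx]; omega
    by_cases hfx : pfix p nu
    · -- the wrapped index is already a root
      obtain ⟨f', rfl⟩ : ∃ f', f = f' + 1 := ⟨f - 1, by omega⟩
      have hr : iterF p s nu = nu := iterF_fix hfx s
      have hpx2 : PySem.List.pyGetD p ((nu : Nat) : Int) 0 = ((nu : Nat) : Int) := by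
        rw [PySem.List.pyGetD_natCast]; exact hfx
      have hfx' : p.getD nu 0 = ((nu : Nat) : Int) := hfx
      refine ⟨p, ?_, rfl, hR, hC, fun _ _ => Iff.rfl⟩
      rw [hr]
      simp only [findA]
      rw [if_pos hguard, hpx, hfx', hpx2]
      rw [if_neg (by simp : ¬((nu : Nat) : Int) ≠ ((nu : Nat) : Int))]
      simp only []
      rw [pySetD_wrap p x _ (by omega) hneg, ← hnudef, set_eq_self hfx hnu]
    · have hs : ∃ s', s = s' + 1 := by
        cases s with
        | zero => exact absurd hfix hfx
        | succ s' => exact ⟨s', rfl⟩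
      obtain ⟨s', rfl⟩ := hs
      have hpxcast : p.getD nu 0 = ((pstep p nu : Nat) : Int) := by
        unfold pstep; rw [Int.toNat_of_nonneg hnn.1]
      have hsk : pstep p nu < p.length := by unfold pstep; omega
      obtain ⟨p1, heq1, hlen1, hR1, hC1, hrt1⟩ :=
        find_spec s' p (pstep p nu) f hR hC hsk hfix (by omega)
      set r0 : Nat := iterF p s' (pstep p nu) with hr0def
      have hiter : iterF p (s' + 1) nu = r0 := rfl
      have hr0lt : r0 < p.length := iterF_lt hR hsk s'
      have hRtk : Rt p nu r0 := ⟨⟨s' + 1, rfl⟩, hfix⟩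
      have hRtk1 : Rt p1 nu r0 := (hrt1 nu r0).mp hRtk
      have hnf1 : ¬ pfix p1 nu := by
        intro hfix1
        have h1 : Rt p nu nu := (hrt1 nu nu).mpr (Rt_self hfix1)
        have h2 : nu = r0 := Rt_unique h1 hRtk
        exact hfx (h2 ▸ hfix)
      have hklen1 : nu < p1.length := by omega
      refine ⟨p1.set nu (r0 : Int), ?_, ?_, ?_, ?_, ?_⟩
      · rw [hiter]
        simp only [findA]
        rw [if_pos (by simpa using hguard)]
        rw [hpx, hpxcast, heq1]
        simp only []
        rw [pySetD_wrap p1 x _ (by omega) hneg]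
        have : (x + (p1.length : Int)).toNat = nu := by omega
        rw [this]
      · simp [hlen1]
      · intro t ht
        simp only [List.length_set] at ht
        by_cases htk : t = nu
        · rw [htk, getD_set_self hklen1]
          refine ⟨by exact_mod_cast Nat.zero_le r0, ?_⟩
          simp only [List.length_set]
          rw [hlen1]; exact_mod_cast hr0lt
        · rw [getD_set_ne htk]
          have := hR1 t (by omega)
          simpa using this
      · intro t ht htnf
        simp only [List.length_set] at ht
        by_cases htk : t = nu
        · rw [htk]
          have hstept : pstep (p1.set nu (r0 : Int)) nu = r0 := by
            unfold pstep; rw [getD_set_self hklen1]; simp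
          rw [hstept]
          have hd1 : d r0 ≤ d (pstep p nu) := by
            rw [hr0def]; exact d_iterF_le hC hR hsk s'
          have hd2 : d (pstep p nu) < d nu := hC nu hnu hfx
          omega
        · have hfixt : ¬ pfix p1 t := by
            unfold pfix at htnf ⊢
            rwa [getD_set_ne htk] at htnf
          have hstept : pstep (p1.set nu (r0 : Int)) t = pstep p1 t := by
            unfold pstep; rw [getD_set_ne htk]
          rw [hstept]
          exact hC1 t (by omega) hfixt
      · intro j r
        rw [hrt1 j r]
        exact set_root_equiv hklen1 hnf1 hRtk1 j r
  · rw [if_neg hneg] at hfix ⊢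
    have hx' : x = ((x.toNat : Nat) : Int) := by omega
    have hk : x.toNat < p.length := by omega
    obtain ⟨p', h1, h2, h3, h4, h5⟩ := find_spec s p x.toNat fuel hR hC hk hfix (by omega)
    exact ⟨p', by rw [hx']; exact h1, h2, h3, h4, h5⟩

-- combined packaged invariant
def AInv (p comp : List Int) : Prop :=
  InR p ∧ (∃ d, Cert p d) ∧ comp.length = p.length ∧ CInv p comp

theorem getD_map_lt {xs : List Int} {f : Int → Int} {k : Nat} (h : k < xs.length) :
    (xs.map f).getD k 0 = f (xs.getD k 0) := by
  rw [List.getD_eq_getElem?_getD, List.getD_eq_getElem?_getD, List.getElem?_map,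
    List.getElem?_eq_getElem h]
  rfl

theorem pyGetD_idx (xs : List Int) (x : Int) (h0 : -(xs.length : Int) ≤ x) (_h1 : x < (xs.length : Int)) :
    PySem.List.pyGetD xs x 0 = xs.getD (if x < 0 then x + xs.length else x).toNat 0 := by
  by_cases hneg : x < 0
  · rw [if_pos hneg]; exact pyGetD_wrap xs x h0 hneg
  · rw [if_neg hneg, show x = ((x.toNat : Nat) : Int) by omega, PySem.List.pyGetD_natCast]
    rw [Int.toNat_natCast]

-- one union step of A matches one relabel step of B
theorem union_step (p comp : List Int) (i j : Int) (hi0 : 0 ≤ i) (hi1 : i < (p.length : Int))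
    (hj0 : 0 ≤ j) (hj1 : j < (p.length : Int)) (hInv : AInv p comp) :
    (unionA p i j).length = p.length ∧ AInv (unionA p i j)
      (let ci := PySem.List.pyGetD comp i 0
       let cj := PySem.List.pyGetD comp j 0
       if ci ≠ cj then comp.map (fun x => if x = ci then cj else x) else comp) := by
  obtain ⟨hR, ⟨d, hC⟩, hclen, hCI⟩ := hInv
  have hni : i.toNat < p.length := by omega
  have hnj : j.toNat < p.length := by omega
  obtain ⟨ri, hRti, hci⟩ := hCI i.toNat hni
  obtain ⟨rj, hRtj, hcj⟩ := hCI j.toNat hnj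
  -- first find
  obtain ⟨s1, hs1len, hs1fix⟩ := root_exists hR hC hni
  have hnorm1 : (if i < 0 then i + p.length else i).toNat = i.toNat := by
    rw [if_neg (not_lt.mpr hi0)]
  obtain ⟨p1, heq1, hlen1, hR1, hC1, hrt1⟩ :=
    find_spec_int p i s1 (p.length + 1) hR hC (by omega) hi1 (by rw [hnorm1]; exact hs1fix) (by omega)
  rw [hnorm1] at heq1
  have hr1 : iterF p s1 i.toNat = ri := Rt_unique ⟨⟨s1, rfl⟩, hs1fix⟩ hRti
  rw [hr1] at heq1
  -- second find
  have hnj1 : j.toNat < p1.length := by omega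
  obtain ⟨s2, hs2len, hs2fix⟩ := root_exists hR1 hC1 hnj1
  have hnorm2 : (if j < 0 then j + p1.length else j).toNat = j.toNat := by
    rw [if_neg (not_lt.mpr hj0)]
  obtain ⟨p2, heq2, hlen2, hR2, hC2, hrt2⟩ :=
    find_spec_int p1 j s2 (p1.length + 1) hR1 hC1 (by omega) (by omega)
      (by rw [hnorm2]; exact hs2fix) (by omega)
  rw [hnorm2] at heq2
  have hr2 : iterF p1 s2 j.toNat = rj := by
    refine Rt_unique ?_ hRtj
    exact (hrt1 j.toNat (iterF p1 s2 j.toNat)).mpr ⟨⟨s2, rfl⟩, hs2fix⟩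
  rw [hr2] at heq2
  -- roots are in range and fixed
  have hrilt : ri < p.length := by rw [← hr1]; exact iterF_lt hR hni s1
  have hrjlt : rj < p.length := by
    rw [← hr2]
    have := iterF_lt hR1 hnj1 s2
    omega
  have hfri2 : pfix p2 ri := ((hrt2 ri ri).mp ((hrt1 ri ri).mp (Rt_self (hr1 ▸ hs1fix)))).2
  have hfrj2 : pfix p2 rj := ((hrt2 rj rj).mp ((hrt1 rj rj).mp (Rt_self hRtj.2))).2
  -- the guards agree
  have hgci : PySem.List.pyGetD comp i 0 = (ri : Int) := by
    rw [pyGetD_idx comp i (by omega) (by omega)]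
    rw [if_neg (not_lt.mpr hi0)]
    exact hci
  have hgcj : PySem.List.pyGetD comp j 0 = (rj : Int) := by
    rw [pyGetD_idx comp j (by omega) (by omega)]
    rw [if_neg (not_lt.mpr hj0)]
    exact hcj
  have hAeq : unionA p i j = if (ri : Int) ≠ (rj : Int) then PySem.List.pySetD p2 (ri : Int) (rj : Int) else p2 := by
    simp only [unionA, heq1, heq2]
  by_cases hrij : ri = rj
  · -- no merge on either side
    subst hrij
    have hA : unionA p i j = p2 := by rw [hAeq]; simp
    have hB : (let ci := PySem.List.pyGetD comp i 0
               let cj := PySem.List.pyGetD comp j 0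
               if ci ≠ cj then comp.map (fun x => if x = ci then cj else x) else comp) = comp := by
      simp only [hgci, hgcj]
      simp
    rw [hA, hB]
    refine ⟨by omega, hR2, ⟨d, hC2⟩, by omega, ?_⟩
    intro k hk
    obtain ⟨rk, hk1, hk2⟩ := hCI k (by omega)
    exact ⟨rk, (hrt2 k rk).mp ((hrt1 k rk).mp hk1), hk2⟩
  · -- merge: A links root ri under root rj, B relabels class ri to rj
    have hA : unionA p i j = p2.set ri ((rj : Nat) : Int) := by
      rw [hAeq, if_pos (by exact_mod_cast hrij), PySem.List.pySetD_of_nonneg _ _ (by positivity)]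
      simp
    have hB : (let ci := PySem.List.pyGetD comp i 0
               let cj := PySem.List.pyGetD comp j 0
               if ci ≠ cj then comp.map (fun x => if x = ci then cj else x) else comp)
        = comp.map (fun x => if x = (ri : Int) then (rj : Int) else x) := by
      simp only [hgci, hgcj]
      rw [if_pos (by exact_mod_cast hrij)]
    rw [hA, hB]
    have hrilt2 : ri < p2.length := by omega
    have hrjlt2 : rj < p2.length := by omega
    have hlink := set_link_root hrilt2 hfri2 hfrj2 hrij
    constructor
    · simp; omega
    refine ⟨?_, ?_, ?_, ?_⟩
    · -- InR
      intro t ht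
      simp only [List.length_set] at ht ⊢
      by_cases htr : t = ri
      · rw [htr, getD_set_self hrilt2]
        constructor
        · exact_mod_cast Nat.zero_le rj
        · exact_mod_cast (by omega : rj < p2.length)
      · rw [getD_set_ne htr]
        exact hR2 t ht
    · -- acyclicity certificate, shifted on the class of ri
      classical
      refine ⟨fun x => d x + (if Rt p2 x ri then d rj + 1 else 0), ?_⟩
      intro t ht htnf
      simp only [List.length_set] at ht
      by_cases htr : t = ri
      · rw [htr]
        have hstept : pstep (p2.set ri ((rj : Nat) : Int)) ri = rj := by
          unfold pstep; rw [getD_set_self hrilt2]; simp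
        rw [hstept]
        have hc1 : Rt p2 ri ri := Rt_self hfri2
        have hc2 : ¬ Rt p2 rj ri := by
          intro hcon
          exact hrij (Rt_unique (Rt_self hfrj2) hcon).symm
        beta_reduce
        rw [if_pos hc1, if_neg hc2]
        omega
      · have hnf2 : ¬ pfix p2 t := by
          unfold pfix at htnf ⊢
          rwa [getD_set_ne htr] at htnf
        have hstept : pstep (p2.set ri ((rj : Nat) : Int)) t = pstep p2 t := by
          unfold pstep; rw [getD_set_ne htr]
        rw [hstept]
        beta_reduce
        have hbase : d (pstep p2 t) < d t := hC2 t ht hnf2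
        have hcondiff : Rt p2 (pstep p2 t) ri ↔ Rt p2 t ri := ⟨Rt_of_step, Rt_step hnf2⟩
        by_cases hcnd : Rt p2 t ri
        · rw [if_pos hcnd, if_pos (hcondiff.mpr hcnd)]; omega
        · rw [if_neg hcnd, if_neg (fun hx => hcnd (hcondiff.mp hx))]; omega
    · -- lengths
      simp only [List.length_map, List.length_set]; omega
    · -- CInv
      intro k hk
      simp only [List.length_set] at hk
      obtain ⟨rk, hk1, hk2⟩ := hCI k (by omega)
      have hk12 : Rt p2 k rk := (hrt2 k rk).mp ((hrt1 k rk).mp hk1)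
      refine ⟨if rk = ri then rj else rk, hlink k rk hk12, ?_⟩
      rw [getD_map_lt (by omega), hk2]
      by_cases hkr : rk = ri
      · rw [if_pos hkr, if_pos (by exact_mod_cast hkr)]
      · rw [if_neg hkr, if_neg (by exact_mod_cast hkr)]

-- the inner sieve loop (fixed i, all multiples j)
theorem inner_fold (i : Int) (hi0 : 1 ≤ i) :
    ∀ (js : List Int) (p comp : List Int), AInv p comp → i < (p.length : Int) →
    (∀ j ∈ js, 0 ≤ j ∧ j < (p.length : Int)) →
    (js.foldl (fun p j => unionA p i j) p).length = p.length ∧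
    AInv (js.foldl (fun p j => unionA p i j) p)
      (js.foldl (fun c j =>
          let ci := PySem.List.pyGetD c i 0
          let cj := PySem.List.pyGetD c j 0
          if ci ≠ cj then c.map (fun x => if x = ci then cj else x) else c) comp) := by
  intro js
  induction js with
  | nil => intro p comp h _ _; exact ⟨rfl, h⟩
  | cons j js ih =>
    intro p comp hInv hilt hbnd
    obtain ⟨hb1, hb2⟩ := hbnd j (List.mem_cons_self)
    have hstep := union_step p comp i j (by omega) hilt hb1 hb2 hInv
    simp only [List.foldl_cons]
    have := ih (unionA p i j) _ hstep.2 (by omega)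
      (fun j' hj' => by
        have := hbnd j' (List.mem_cons_of_mem _ hj')
        omega)
    exact ⟨by omega, this.2⟩

-- the outer sieve loop
theorem outer_fold (n : Int) :
    ∀ (is : List Int) (p comp : List Int), AInv p comp → (p.length : Int) = n + 1 →
    (∀ i ∈ is, 1 ≤ i ∧ i < n + 1) →
    (is.foldl (fun p i => (PySem.List.pyRange (i * 2) (n + 1) i).foldl (fun p j => unionA p i j) p) p).length = p.length ∧
    AInv (is.foldl (fun p i => (PySem.List.pyRange (i * 2) (n + 1) i).foldl (fun p j => unionA p i j) p) p)
      (is.foldl (fun c i => (PySem.List.pyRange (i * 2) (n + 1) i).foldl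
          (fun c j =>
            let ci := PySem.List.pyGetD c i 0
            let cj := PySem.List.pyGetD c j 0
            if ci ≠ cj then c.map (fun x => if x = ci then cj else x) else c) c) comp) := by
  intro is
  induction is with
  | nil => intro p comp h _ _; exact ⟨rfl, h⟩
  | cons i is ih =>
    intro p comp hInv hlen hbnd
    obtain ⟨hb1, hb2⟩ := hbnd i (List.mem_cons_self)
    have hjs : ∀ j ∈ PySem.List.pyRange (i * 2) (n + 1) i, 0 ≤ j ∧ j < (p.length : Int) := by
      intro j hj
      have := (PySem.List.mem_pyRange_iff_of_pos (by omega) j).mp hj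
      constructor
      · omega
      · omega
    have hstep := inner_fold i hb1 (PySem.List.pyRange (i * 2) (n + 1) i) p comp hInv (by omega) hjs
    simp only [List.foldl_cons]
    have := ih _ _ hstep.2 (by omega) (fun i' hi' => hbnd i' (List.mem_cons_of_mem _ hi'))
    exact ⟨by omega, this.2⟩

-- the query loop: A's threaded find-pairs produce exactly B's label comparisons
theorem query_fold (comp : List Int) (m : Nat) :
    ∀ (qs : List (List Int)) (p : List Int) (acc : List Bool), AInv p comp → p.length = m →
    (∀ q ∈ qs, q.length = 2 ∧ ∀ e ∈ q, -(m : Int) ≤ e ∧ e < (m : Int)) →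
    (qs.foldl queryStepA (p, acc)).2 = acc ++ qs.map (queryB comp) := by
  intro qs
  induction qs with
  | nil => intro p acc _ _ _; simp
  | cons q qs ih =>
    intro p acc hInv hplen hbnd
    obtain ⟨hq2, hqe⟩ := hbnd q (List.mem_cons_self)
    obtain ⟨u, v, rfl⟩ := List.length_eq_two.mp hq2
    obtain ⟨hu0, hu1⟩ := hqe u (by simp)
    obtain ⟨hv0, hv1⟩ := hqe v (by simp)
    obtain ⟨hR, ⟨d, hC⟩, hclen, hCI⟩ := hInv
    have hnu : (if u < 0 then u + p.length else u).toNat < p.length := by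
      split_ifs <;> omega
    have hnv : (if v < 0 then v + p.length else v).toNat < p.length := by
      split_ifs <;> omega
    obtain ⟨ru, hRtu, hcu⟩ := hCI _ hnu
    obtain ⟨rv, hRtv, hcv⟩ := hCI _ hnv
    -- find(u)
    obtain ⟨s1, hs1len, hs1fix⟩ := root_exists hR hC hnu
    obtain ⟨p1, heq1, hlen1, hR1, hC1, hrt1⟩ :=
      find_spec_int p u s1 (p.length + 1) hR hC (by omega) (by omega) hs1fix (by omega)
    have hr1 : iterF p s1 (if u < 0 then u + p.length else u).toNat = ru :=
      Rt_unique ⟨⟨s1, rfl⟩, hs1fix⟩ hRtu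
    rw [hr1] at heq1
    -- find(v)
    have hnv1 : (if v < 0 then v + p1.length else v).toNat < p1.length := by
      rw [hlen1]; exact hnv
    obtain ⟨s2, hs2len, hs2fix⟩ := root_exists hR1 hC1 hnv1
    obtain ⟨p2, heq2, hlen2, hR2, hC2, hrt2⟩ :=
      find_spec_int p1 v s2 (p1.length + 1) hR1 hC1 (by omega) (by omega) hs2fix (by omega)
    have hveq : (if v < 0 then v + p1.length else v).toNat = (if v < 0 then v + p.length else v).toNat := by
      rw [hlen1]
    have hr2 : iterF p1 s2 (if v < 0 then v + p1.length else v).toNat = rv := by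
      have h1 : Rt p1 ((if v < 0 then v + (p1.length : Int) else v).toNat)
          (iterF p1 s2 (if v < 0 then v + (p1.length : Int) else v).toNat) := ⟨⟨s2, rfl⟩, hs2fix⟩
      have h2 : Rt p1 ((if v < 0 then v + (p1.length : Int) else v).toNat) rv := by
        rw [hveq]; exact (hrt1 _ rv).mp hRtv
      exact Rt_unique h1 h2
    rw [hr2] at heq2
    -- the produced booleans agree
    have hBu : PySem.List.pyGetD comp u 0 = (ru : Int) := by
      rw [pyGetD_idx comp u (by omega) (by omega)]
      rw [show (if u < 0 then u + comp.length else u).toNat = (if u < 0 then u + p.length else u).toNat by rw [hclen]]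
      exact hcu
    have hBv : PySem.List.pyGetD comp v 0 = (rv : Int) := by
      rw [pyGetD_idx comp v (by omega) (by omega)]
      rw [show (if v < 0 then v + comp.length else v).toNat = (if v < 0 then v + p.length else v).toNat by rw [hclen]]
      exact hcv
    have hstep : queryStepA (p, acc) [u, v] = (p2, acc ++ [queryB comp [u, v]]) := by
      simp only [queryStepA, queryB, heq1, heq2, hBu, hBv]
    have hInv2 : AInv p2 comp := by
      refine ⟨hR2, ⟨d, hC2⟩, by omega, ?_⟩
      intro k hk
      obtain ⟨rk, hk1, hk2⟩ := hCI k (by omega)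
      exact ⟨rk, (hrt2 k rk).mp ((hrt1 k rk).mp hk1), hk2⟩
    rw [List.foldl_cons, hstep]
    rw [ih p2 (acc ++ [queryB comp [u, v]]) hInv2 (by omega)
      (fun q' hq' => hbnd q' (List.mem_cons_of_mem _ hq'))]
    simp

-- the initial state: parent = comp = list(range(n+1))
theorem init_inv (n : Int) (_hn : 0 ≤ n) :
    (PySem.List.pyRange 0 (n + 1) 1).length = (n + 1).toNat ∧
    AInv (PySem.List.pyRange 0 (n + 1) 1) (PySem.List.pyRange 0 (n + 1) 1) := by
  have hlen : (PySem.List.pyRange 0 (n + 1) 1).length = (n + 1).toNat := by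
    rw [PySem.List.length_pyRange_one]
    simp
  have hget : ∀ k, k < (PySem.List.pyRange 0 (n + 1) 1).length →
      (PySem.List.pyRange 0 (n + 1) 1).getD k 0 = (k : Int) := by
    intro k hk
    rw [List.getD_eq_getElem?_getD, List.getElem?_eq_getElem hk]
    rw [PySem.List.getElem_pyRange_one]
    simp
  have hfix : ∀ k, k < (PySem.List.pyRange 0 (n + 1) 1).length → pfix (PySem.List.pyRange 0 (n + 1) 1) k := by
    intro k hk; exact hget k hk
  refine ⟨hlen, ?_, ⟨fun _ => 0, ?_⟩, rfl, ?_⟩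
  · intro k hk
    rw [hget k hk]
    constructor
    · exact_mod_cast Nat.zero_le k
    · exact_mod_cast hk
  · intro k hk hnf
    exact absurd (hfix k hk) hnf
  · intro k hk
    exact ⟨k, Rt_self (hfix k hk), hget k hk⟩

-- ===== VERDICT (by name: the statement is the Claim_ definition above) =====
theorem areConnected_spec : Claim_equal_areConnected := by
  unfold Claim_equal_areConnected
  intro n threshold queries hdom hpre
  unfold Spec_areConnected
  obtain ⟨hpt, hq⟩ := hpre
  by_cases hn : 0 ≤ n
  · have hth : 0 ≤ threshold := hpt hn
    simp only [areConnected, areConnected_alt]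
    have hinit := init_inv n hn
    have hbnd : ∀ i ∈ PySem.List.pyRange (threshold + 1) (n + 1) 1, 1 ≤ i ∧ i < n + 1 := by
      intro i hi
      have := (PySem.List.mem_pyRange_one).mp hi
      omega
    have houter := outer_fold n (PySem.List.pyRange (threshold + 1) (n + 1) 1)
      (PySem.List.pyRange 0 (n + 1) 1) (PySem.List.pyRange 0 (n + 1) 1)
      hinit.2 (by rw [hinit.1]; omega) hbnd
    have hqbnd : ∀ q ∈ queries, q.length = 2 ∧ ∀ e ∈ q, -(((n + 1).toNat : Nat) : Int) ≤ e ∧ e < (((n + 1).toNat : Nat) : Int) := by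
      intro q hqm
      obtain ⟨h1, h2⟩ := hq q hqm
      refine ⟨h1, fun e he => ?_⟩
      have := h2 e he
      omega
    rw [query_fold _ (n + 1).toNat queries _ [] houter.2 (by rw [houter.1, hinit.1]) hqbnd]
    simp
  · have hqnil : queries = [] := by
      cases queries with
      | nil => rfl
      | cons q qs =>
        exfalso
        have h := hq q List.mem_cons_self
        obtain ⟨u, v, rfl⟩ := List.length_eq_two.mp h.1
        have hu := h.2 u (by simp)
        omega
    subst hqnil
    simp [areConnected, areConnected_alt]
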